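-- pv_equiv track=rewrite | github.com/poladbachs/banking | downloaders/abb_scrap.py | guess_quarter_from_months
-- ===== SOURCE A (Python) =====
-- MONTH_TO_Q = {
--     "yanvar": "Q1", "fevral": "Q1", "mart": "Q1",
--     "aprel": "Q2", "may": "Q2", "iyun": "Q2",
--     "iyul": "Q3", "avqust": "Q3", "sentyabr": "Q3",
--     "oktyabr": "Q4", "noyabr": "Q4", "dekabr": "Q4",
-- }
--
-- def guess_quarter_from_months(text_norm: str):
--     months = [m for m in MONTH_TO_Q.keys() if m in text_norm]
--     if not months:
--         return None
--     last = None
--     last_pos = -1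
--     for m in months:
--         p = text_norm.rfind(m)
--         if p > last_pos:
--             last_pos = p
--             last = m
--     return MONTH_TO_Q.get(last)
-- ===== SOURCE B (Python) =====
-- MONTH_TO_Q = {
--     "yanvar": "Q1", "fevral": "Q1", "mart": "Q1",
--     "aprel": "Q2", "may": "Q2", "iyun": "Q2",
--     "iyul": "Q3", "avqust": "Q3", "sentyabr": "Q3",
--     "oktyabr": "Q4", "noyabr": "Q4", "dekabr": "Q4",
-- }
--
-- def guess_quarter_from_months(text_norm: str):
--     # single left-to-right positional scan: the match starting at the
--     # highest index seen last overwrites, so the latest month wins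
--     best = None
--     for i in range(len(text_norm)):
--         for m, q in MONTH_TO_Q.items():
--             if text_norm.startswith(m, i):
--                 best = q
--     return best
-- ===== Notes on version B (the rewrite author's own statement) =====
-- stated objective: alternative
-- what changed: Replaced the filter-months-then-argmax-of-rfind two-phase search by a single left-to-right positional scan that tests each month at every index and keeps the quarter of the latest match.
import Mathlib
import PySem

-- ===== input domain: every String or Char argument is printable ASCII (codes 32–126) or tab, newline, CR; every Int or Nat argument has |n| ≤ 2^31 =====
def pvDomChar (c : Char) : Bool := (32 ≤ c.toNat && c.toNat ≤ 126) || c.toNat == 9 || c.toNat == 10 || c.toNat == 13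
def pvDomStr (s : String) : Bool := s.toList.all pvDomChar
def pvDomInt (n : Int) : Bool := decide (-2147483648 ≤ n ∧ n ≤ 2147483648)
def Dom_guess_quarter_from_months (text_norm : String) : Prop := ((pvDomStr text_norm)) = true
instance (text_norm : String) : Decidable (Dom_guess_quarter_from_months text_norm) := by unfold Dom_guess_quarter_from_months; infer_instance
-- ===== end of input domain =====

-- B replaces A's two-phase filter-then-argmax-of-rfind by a single left-to-right
-- positional scan keeping the quarter of the latest month match (alternative decomposition).

-- ===== PORT A =====
def MONTH_TO_Q : PySem.Dict String String := PySem.Dict.ofList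
  [("yanvar", "Q1"), ("fevral", "Q1"), ("mart", "Q1"),
   ("aprel", "Q2"), ("may", "Q2"), ("iyun", "Q2"),
   ("iyul", "Q3"), ("avqust", "Q3"), ("sentyabr", "Q3"),
   ("oktyabr", "Q4"), ("noyabr", "Q4"), ("dekabr", "Q4")]

def guess_quarter_from_months (text_norm : String) : Option String :=
  let months := (PySem.Dict.keys MONTH_TO_Q).filter (fun m => PySem.Str.isIn m text_norm)
  if months = [] then none
  else
    let r := months.foldl (fun st m =>
        let p := PySem.Str.rfind text_norm m
        if st.2 < p then (some m, p) else st) ((none : Option String), (-1 : Int))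
    match r.1 with
    | none => none
    | some last => PySem.Dict.get? MONTH_TO_Q last

-- ===== PORT B =====
def guess_quarter_from_months_alt (text_norm : String) : Option String :=
  (List.range text_norm.toList.length).foldl  -- range(len(text_norm))
    (fun best i =>
      (PySem.Dict.items MONTH_TO_Q).foldl
        (fun b mq =>
          -- text_norm.startswith(m, i): exact for the indices 0 ≤ i < len used here
          if PySem.Chars.startswith (text_norm.toList.drop i) mq.1.toList then some mq.2 else b)
        best)
    none

-- ===== PRECONDITION & SPEC =====
def Spec_guess_quarter_from_months (text_norm : String) (out : Option String) : Prop := out = guess_quarter_from_months_alt text_norm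
instance (text_norm : String) (out : Option String) : Decidable (Spec_guess_quarter_from_months text_norm out) := by unfold Spec_guess_quarter_from_months; infer_instance

-- ===== CLAIM (what is proved, stated in full; the proofs are below) =====
def Claim_equal_guess_quarter_from_months : Prop := ∀ (text_norm : String), Dom_guess_quarter_from_months text_norm → Spec_guess_quarter_from_months text_norm (guess_quarter_from_months text_norm)

-- ===== LEMMAS AND PROOFS =====

-- the literal item list of MONTH_TO_Q
def IL : List (String × String) :=
  [("yanvar", "Q1"), ("fevral", "Q1"), ("mart", "Q1"),
   ("aprel", "Q2"), ("may", "Q2"), ("iyun", "Q2"),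
   ("iyul", "Q3"), ("avqust", "Q3"), ("sentyabr", "Q3"),
   ("oktyabr", "Q4"), ("noyabr", "Q4"), ("dekabr", "Q4")]

lemma items_eq : PySem.Dict.items MONTH_TO_Q = IL := by decide
lemma keys_eq : PySem.Dict.keys MONTH_TO_Q = IL.map Prod.fst := by decide

-- quarter of a month key
def qOf (m : String) : String := (((IL.find? (·.1 == m)).map Prod.snd).getD "")

lemma pair_mem_of_key_mem : ∀ m ∈ IL.map Prod.fst, (m, qOf m) ∈ IL := by decide
lemma key_ne_nil : ∀ m ∈ IL.map Prod.fst, m.toList ≠ [] := by decide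
lemma get?_IL : ∀ m ∈ IL.map Prod.fst, PySem.Dict.get? MONTH_TO_Q m = some (qOf m) := by decide
lemma prefix_free : ∀ p ∈ IL, ∀ q ∈ IL, p.1.toList <+: q.1.toList → p = q := by decide

lemma uniq_match {t : List Char} {p q : String × String} (hp : p ∈ IL) (hq : q ∈ IL)
    (h1 : p.1.toList <+: t) (h2 : q.1.toList <+: t) : p = q := by
  rcases List.prefix_or_prefix_of_prefix h1 h2 with h | h
  · exact prefix_free p hp q hq h
  · exact (prefix_free q hq p hp h).symm

-- the (unique) month hit at position i of s, searched as B's inner loop does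
def hitAt (s : List Char) (i : Nat) : Option (String × String) :=
  IL.reverse.find? (fun mq => PySem.Chars.startswith (s.drop i) mq.1.toList)

-- overwrite an accumulator with a hit, keep it on a miss
def upd {β : Type} (acc : Option β) (o : Option β) : Option β :=
  match o with | some y => some y | none => acc

-- generic: a foldl that overwrites with `some` on a hit returns the last hit
lemma foldl_bind_last {α β : Type} (l : List α) (h : α → Option β) (b : Option β) :
    l.foldl (fun acc x => upd acc (h x)) b = upd b (l.reverse.findSome? h) := by
  induction l generalizing b with
  | nil => rfl
  | cons x l ih =>
      simp only [List.foldl_cons, List.reverse_cons, List.findSome?_append, ih]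
      cases hfs : l.reverse.findSome? h with
      | some y => simp [upd, hfs]
      | none => cases hx : h x <;> simp [upd, hfs, hx]

-- B's value, characterized on the list of characters
def Bchar (s : List Char) : Option String :=
  (List.range s.length).reverse.findSome? (fun i => (hitAt s i).map Prod.snd)

lemma findSome?_guard {α β : Type} (l : List α) (p : α → Bool) (f : α → β) :
    l.findSome? (fun x => if p x then some (f x) else none) = (l.find? p).map f := by
  induction l with
  | nil => rfl
  | cons x l ih => by_cases hx : p x <;> simp [List.find?_cons, hx, ih]

lemma B_eq (t : String) :
    guess_quarter_from_months_alt t = upd none (Bchar t.toList) := by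
  unfold guess_quarter_from_months_alt Bchar hitAt
  rw [items_eq]
  have hfun : (fun (best : Option String) (i : Nat) =>
      IL.foldl (fun b mq => if PySem.Chars.startswith (t.toList.drop i) mq.1.toList then some mq.2 else b) best)
      = (fun (best : Option String) (i : Nat) =>
          upd best ((IL.reverse.find? (fun mq => PySem.Chars.startswith (t.toList.drop i) mq.1.toList)).map Prod.snd)) := by
    funext b i
    have h1 : (fun (b : Option String) (mq : String × String) =>
        if PySem.Chars.startswith (t.toList.drop i) mq.1.toList then some mq.2 else b)
        = (fun (b : Option String) (mq : String × String) =>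
            upd b (if PySem.Chars.startswith (t.toList.drop i) mq.1.toList then some mq.2 else (none : Option String))) := by
      funext b mq
      by_cases h : PySem.Chars.startswith (t.toList.drop i) mq.1.toList <;> simp [h, upd]
    rw [h1,
      foldl_bind_last IL (fun mq => if PySem.Chars.startswith (t.toList.drop i) mq.1.toList then some mq.2 else (none : Option String)) b,
      findSome?_guard]
  rw [hfun,
    foldl_bind_last (List.range t.toList.length)
      (fun i => ((IL.reverse.find? (fun mq => PySem.Chars.startswith (t.toList.drop i) mq.1.toList)).map Prod.snd))
      none]

-- rfind.go finds the highest match index ≤ j, or -1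
lemma go_spec (s m : List Char) (j : Nat) :
    (PySem.Chars.rfind.go s m j = -1 ∧ ∀ i ≤ j, ¬ m <+: s.drop i) ∨
    (∃ k ≤ j, PySem.Chars.rfind.go s m j = (k : Int) ∧ m <+: s.drop k ∧
      ∀ i ≤ j, k < i → ¬ m <+: s.drop i) := by
  induction j with
  | zero =>
      by_cases h : m <+: s
      · right; exact ⟨0, le_refl 0, by simp [PySem.Chars.rfind.go, List.isPrefixOf_iff_prefix, h], by simpa using h, by omega⟩
      · left; refine ⟨by simp [PySem.Chars.rfind.go, List.isPrefixOf_iff_prefix, h], ?_⟩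
        intro i hi; interval_cases i; simpa using h
  | succ j ih =>
      by_cases h : m <+: s.drop (j + 1)
      · right
        refine ⟨j + 1, le_refl _, by simp [PySem.Chars.rfind.go, List.isPrefixOf_iff_prefix, h], h, ?_⟩
        intro i hi hlt; omega
      · have hgo : PySem.Chars.rfind.go s m (j + 1) = PySem.Chars.rfind.go s m j := by
          simp [PySem.Chars.rfind.go, List.isPrefixOf_iff_prefix, h]
        rcases ih with ⟨h1, h2⟩ | ⟨k, hk, h1, h2, h3⟩
        · left; refine ⟨hgo.trans h1, ?_⟩
          intro i hi
          rcases Nat.lt_or_ge i (j + 1) with hi' | hi'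
          · exact h2 i (by omega)
          · have : i = j + 1 := by omega
            simpa [this] using h
        · right
          refine ⟨k, by omega, hgo.trans h1, h2, ?_⟩
          intro i hi hlt
          rcases Nat.lt_or_ge i (j + 1) with hi' | hi'
          · exact h3 i (by omega) hlt
          · have : i = j + 1 := by omega
            simpa [this] using h

-- A's argmax loop: either nothing beat the initial state, or the result is a
-- month of the list whose rfind is maximal and beats the initial position
lemma fold_argmax (t : String) (L : List String) (st : Option String × Int) :
    (L.foldl (fun st m =>
        if st.2 < PySem.Str.rfind t m then (some m, PySem.Str.rfind t m) else st) st = st ∧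
      ∀ m ∈ L, PySem.Str.rfind t m ≤ st.2) ∨
    (∃ m ∈ L,
      (L.foldl (fun st m =>
        if st.2 < PySem.Str.rfind t m then (some m, PySem.Str.rfind t m) else st) st) = (some m, PySem.Str.rfind t m) ∧
      st.2 < PySem.Str.rfind t m ∧
      ∀ m' ∈ L, PySem.Str.rfind t m' ≤ PySem.Str.rfind t m) := by
  induction L generalizing st with
  | nil => left; simp
  | cons x L ih =>
      by_cases hx : st.2 < PySem.Str.rfind t x
      · have hstep : (x :: L).foldl (fun st m =>
            if st.2 < PySem.Str.rfind t m then (some m, PySem.Str.rfind t m) else st) st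
            = L.foldl (fun st m =>
            if st.2 < PySem.Str.rfind t m then (some m, PySem.Str.rfind t m) else st) (some x, PySem.Str.rfind t x) := by
          rw [List.foldl_cons, if_pos hx]
        rcases ih (some x, PySem.Str.rfind t x) with ⟨h1, h2⟩ | ⟨m, hm, h1, h2, h3⟩
        · right
          refine ⟨x, by simp, hstep.trans h1, hx, ?_⟩
          intro m' hm'
          rcases List.mem_cons.1 hm' with rfl | hm'
          · exact le_refl _
          · exact h2 m' hm'
        · right
          refine ⟨m, by simp [hm], hstep.trans h1, by omega, ?_⟩
          intro m' hm'
          rcases List.mem_cons.1 hm' with rfl | hm'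
          · omega
          · exact h3 m' hm'
      · have hstep : (x :: L).foldl (fun st m =>
            if st.2 < PySem.Str.rfind t m then (some m, PySem.Str.rfind t m) else st) st
            = L.foldl (fun st m =>
            if st.2 < PySem.Str.rfind t m then (some m, PySem.Str.rfind t m) else st) st := by
          rw [List.foldl_cons, if_neg hx]
        rcases ih st with ⟨h1, h2⟩ | ⟨m, hm, h1, h2, h3⟩
        · left
          refine ⟨hstep.trans h1, ?_⟩
          intro m' hm'
          rcases List.mem_cons.1 hm' with rfl | hm'
          · omega
          · exact h2 m' hm'
        · right
          refine ⟨m, by simp [hm], hstep.trans h1, h2, ?_⟩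
          intro m' hm'
          rcases List.mem_cons.1 hm' with rfl | hm'
          · omega
          · exact h3 m' hm'

-- findSome? over the descending range picks the highest index with a value
lemma findSome?_reverse_range {β : Type} (n : Nat) (h : Nat → Option β) (k : Nat)
    (hk : k < n) (hsome : (h k).isSome) (habove : ∀ i, k < i → i < n → h i = none) :
    (List.range n).reverse.findSome? h = h k := by
  induction n with
  | zero => omega
  | succ n ih =>
      rw [List.range_succ, List.reverse_append]
      simp only [List.reverse_singleton, List.singleton_append, List.findSome?_cons]
      rcases Nat.lt_or_ge k n with hk' | hk'
      · rw [habove n hk' (by omega)]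
        exact ih hk' (fun i h1 h2 => habove i h1 (by omega))
      · have : k = n := by omega
        subst this
        cases hv : h k with
        | none => rw [hv] at hsome; simp at hsome
        | some v => simp

lemma isIn_of_prefix_drop {s m : List Char} {i : Nat} (h : m <+: s.drop i) :
    PySem.Chars.isIn m s = true :=
  (PySem.Chars.exists_prefix_drop_iff_isIn m s).1 ⟨i, h⟩

lemma rfind_spec_of_isIn {s : List Char} {m : String} (hm : m.toList ≠ [])
    (h : PySem.Chars.isIn m.toList s = true) :
    ∃ k : Nat, PySem.Chars.rfind s m.toList = (k : Int) ∧ m.toList <+: s.drop k ∧ k < s.length ∧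
      ∀ i, k < i → ¬ m.toList <+: s.drop i := by
  obtain ⟨j, hj⟩ := (PySem.Chars.exists_prefix_drop_iff_isIn m.toList s).2 h
  have hjn : j ≤ s.length := by
    by_contra hgt
    rw [List.drop_eq_nil_of_le (by omega)] at hj
    exact hm (List.prefix_nil.1 hj)
  have hrfl : PySem.Chars.rfind s m.toList = PySem.Chars.rfind.go s m.toList s.length := rfl
  rcases go_spec s m.toList s.length with ⟨_, h2⟩ | ⟨k, hk, h1, h2, h3⟩
  · exact absurd hj (h2 j hjn)
  · refine ⟨k, hrfl.trans h1, h2, ?_, ?_⟩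
    · by_contra hge
      rw [List.drop_eq_nil_of_le (by omega)] at h2
      exact hm (List.prefix_nil.1 h2)
    · intro i hi
      rcases Nat.lt_or_ge s.length i with hi' | hi'
      · rw [List.drop_eq_nil_of_le (by omega)]
        intro hpre; exact hm (List.prefix_nil.1 hpre)
      · exact h3 i (by omega) hi

-- ===== VERDICT (by name: the statement is the Claim_ definition above) =====
theorem guess_quarter_from_months_spec : Claim_equal_guess_quarter_from_months := by
  intro t _
  unfold Spec_guess_quarter_from_months
  rw [B_eq]
  unfold guess_quarter_from_months
  rw [keys_eq]
  set months := (IL.map Prod.fst).filter (fun m => PySem.Str.isIn m t) with hmonths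
  by_cases hM : months = []
  · rw [if_pos hM]
    have hnone : ∀ i, hitAt t.toList i = none := by
      intro i
      cases hfind : hitAt t.toList i with
      | none => rfl
      | some x =>
          exfalso
          unfold hitAt at hfind
          have hpred := List.find?_some hfind
          have hmem : x ∈ IL := List.mem_reverse.1 (List.mem_of_find?_eq_some hfind)
          have hpre : x.1.toList <+: t.toList.drop i := (PySem.Chars.startswith_iff _ _).1 hpred
          have hisin : PySem.Str.isIn x.1 t = true := by
            rw [PySem.Str.isIn_eq]; exact isIn_of_prefix_drop hpre
          have : x.1 ∈ months := by
            rw [hmonths]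
            exact List.mem_filter.2 ⟨List.mem_map_of_mem hmem, hisin⟩
          rw [hM] at this
          exact (List.not_mem_nil).elim this
    have : Bchar t.toList = none := by
      unfold Bchar
      rw [List.findSome?_eq_none_iff]
      intro i _
      rw [hnone i]; rfl
    rw [this]; rfl
  · rw [if_neg hM]
    rw [show (fun (st : Option String × Int) (m : String) =>
        let p := PySem.Str.rfind t m
        if st.2 < p then (some m, p) else st)
      = (fun (st : Option String × Int) (m : String) =>
        if st.2 < PySem.Str.rfind t m then (some m, PySem.Str.rfind t m) else st) from rfl]
    rcases fold_argmax t months ((none : Option String), (-1 : Int)) with ⟨_, h2⟩ | ⟨m, hmm, h1, h2, h3⟩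
    · exfalso
      obtain ⟨m0, hm0⟩ := List.exists_mem_of_ne_nil months hM
      have hm0' := List.mem_filter.1 (hmonths ▸ hm0)
      have hnn := key_ne_nil m0 hm0'.1
      have hisin : PySem.Chars.isIn m0.toList t.toList = true := by
        rw [← PySem.Str.isIn_eq]; exact hm0'.2
      obtain ⟨k, hkeq, _, _, _⟩ := rfind_spec_of_isIn hnn hisin
      have := h2 m0 hm0
      rw [PySem.Str.rfind_eq, hkeq] at this
      omega
    · -- A's result is (some m, rfind m); B finds the same month at index k = rfind m
      rw [h1]
      have hmf := List.mem_filter.1 (hmonths ▸ hmm)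
      have hnn := key_ne_nil m hmf.1
      have hisin : PySem.Chars.isIn m.toList t.toList = true := by
        rw [← PySem.Str.isIn_eq]; exact hmf.2
      obtain ⟨k, hkeq, hkpre, hkn, hkmax⟩ := rfind_spec_of_isIn hnn hisin
      have hpair : (m, qOf m) ∈ IL := pair_mem_of_key_mem m hmf.1
      -- hitAt at k is exactly (m, qOf m)
      have hhit : hitAt t.toList k = some (m, qOf m) := by
        unfold hitAt
        have hpred : (fun mq => PySem.Chars.startswith (t.toList.drop k) mq.1.toList) (m, qOf m) = true := by
          exact (PySem.Chars.startswith_iff _ _).2 hkpre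
        have hsome : (IL.reverse.find? (fun mq => PySem.Chars.startswith (t.toList.drop k) mq.1.toList)).isSome := by
          rw [List.find?_isSome]
          exact ⟨(m, qOf m), List.mem_reverse.2 hpair, hpred⟩
        obtain ⟨x, hx⟩ := Option.isSome_iff_exists.1 hsome
        have hxmem : x ∈ IL := List.mem_reverse.1 (List.mem_of_find?_eq_some hx)
        have hxp := List.find?_some hx
        have hxpre : x.1.toList <+: t.toList.drop k := (PySem.Chars.startswith_iff _ _).1 hxp
        rw [hx, uniq_match hxmem hpair hxpre hkpre]
      -- no month matches above k
      have habove : ∀ i, k < i → i < t.toList.length →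
          ((hitAt t.toList i).map Prod.snd) = none := by
        intro i hki _
        cases hfind : hitAt t.toList i with
        | none => rfl
        | some x =>
            exfalso
            unfold hitAt at hfind
            have hxmem : x ∈ IL := List.mem_reverse.1 (List.mem_of_find?_eq_some hfind)
            have hxp := List.find?_some hfind
            have hxpre : x.1.toList <+: t.toList.drop i := (PySem.Chars.startswith_iff _ _).1 hxp
            have hxin : PySem.Chars.isIn x.1.toList t.toList = true := isIn_of_prefix_drop hxpre
            have hxmonth : x.1 ∈ months := by
              rw [hmonths]
              refine List.mem_filter.2 ⟨List.mem_map_of_mem hxmem, ?_⟩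
              rw [PySem.Str.isIn_eq]; exact hxin
            obtain ⟨k', hk'eq, _, _, hk'max⟩ :=
              rfind_spec_of_isIn (key_ne_nil x.1 (List.mem_map_of_mem hxmem)) hxin
            have hle := h3 x.1 hxmonth
            rw [PySem.Str.rfind_eq, hk'eq, PySem.Str.rfind_eq, hkeq] at hle
            have hik : i ≤ k' := by
              by_contra hgt
              exact hk'max i (by omega) hxpre
            omega
    
      have hB : Bchar t.toList = some (qOf m) := by
        unfold Bchar
        rw [findSome?_reverse_range t.toList.length _ k hkn (by rw [hhit]; rfl) habove]
        rw [hhit]; rfl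
      rw [hB]
      have hget := get?_IL m hmf.1
      simpa [PySem.Str.rfind_eq, hkeq] using hget
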